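-- pv_equiv track=rewrite | github.com/roachnt/CFMeansTutorial | MoreBuggyFcns.py | sum_divs_and_rems
-- ===== SOURCE A (Python) =====
-- def sum_divs_and_rems(n):
--     sum = 0
--     while n >= 1:
--         d = n // 2
--         r = n % 2
--         if r == 1:
--             sum += d
--         else:
--             sum += r
--         out = sum
--         n -= 1
--     return out
-- ===== SOURCE B (Python) =====
-- def sum_divs_and_rems(n):
--     # closed form: returned value is sum of (v // 2) over odd v in 1..n,
--     # i.e. 0 + 1 + ... + (m - 1) with m = (n + 1) // 2 odd numbers.
--     m = (n + 1) // 2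
--     return m * (m - 1) // 2
-- ===== Notes on version B (the rewrite author's own statement) =====
-- stated objective: faster
-- what changed: Replaced the O(n) decrementing while-loop accumulation with the O(1) closed-form m*(m-1)//2 where m = (n+1)//2 counts the odd numbers in 1..n.
import Mathlib
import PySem

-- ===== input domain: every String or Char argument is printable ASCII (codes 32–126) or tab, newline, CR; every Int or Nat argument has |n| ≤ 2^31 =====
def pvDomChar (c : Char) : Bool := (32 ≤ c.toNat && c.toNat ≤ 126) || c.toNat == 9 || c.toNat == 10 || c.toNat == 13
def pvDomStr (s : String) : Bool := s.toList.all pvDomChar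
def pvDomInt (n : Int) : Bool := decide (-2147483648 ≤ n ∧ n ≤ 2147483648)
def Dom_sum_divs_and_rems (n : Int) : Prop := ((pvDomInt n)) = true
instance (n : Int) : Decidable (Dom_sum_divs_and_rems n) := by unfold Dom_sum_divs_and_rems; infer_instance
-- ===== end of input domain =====

-- B replaces A's O(n) decrementing loop by the closed form m*(m-1)//2 with m = (n+1)//2 (faster, asymptotic).

-- ===== PORT A =====
-- the while-loop of A; 'out' is none until first assigned (none on return = UnboundLocalError, excluded by Pre_)
def sum_divs_and_rems_loop (n sum : Int) (out : Option Int) : Option Int :=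
  if h : 1 ≤ n then
    let d := PySem.Int.floordiv n 2
    let r := PySem.Int.mod n 2
    let sum' := if r = 1 then sum + d else sum + r
    sum_divs_and_rems_loop (n - 1) sum' (some sum')
  else out
termination_by n.toNat
decreasing_by omega

def sum_divs_and_rems (n : Int) : Int :=
  (sum_divs_and_rems_loop n 0 none).getD 0   -- getD only reached where Python raises (outside Pre_)

-- ===== PORT B =====
def sum_divs_and_rems_alt (n : Int) : Int :=
  let m := PySem.Int.floordiv (n + 1) 2
  PySem.Int.floordiv (m * (m - 1)) 2

-- ===== PRECONDITION & SPEC =====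
-- Pre_ excludes n < 1, on which A raises UnboundLocalError ('out' never assigned).
def Pre_sum_divs_and_rems (n : Int) : Prop := 1 ≤ n
instance (n : Int) : Decidable (Pre_sum_divs_and_rems n) := by unfold Pre_sum_divs_and_rems; infer_instance
def pvWitness_sum_divs_and_rems : Int := 3

def Spec_sum_divs_and_rems (n : Int) (out : Int) : Prop := out = sum_divs_and_rems_alt n
instance (n : Int) (out : Int) : Decidable (Spec_sum_divs_and_rems n out) := by unfold Spec_sum_divs_and_rems; infer_instance

-- ===== CLAIM (what is proved, stated in full; the proofs are below) =====
def Claim_equal_sum_divs_and_rems : Prop := ∀ (n : Int), Dom_sum_divs_and_rems n → Pre_sum_divs_and_rems n → Spec_sum_divs_and_rems n (sum_divs_and_rems n)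
-- ===== LEMMAS AND PROOFS =====

theorem alt_step (n : Int) (_hn : 2 ≤ n) :
    sum_divs_and_rems_alt n =
      (if PySem.Int.mod n 2 = 1 then PySem.Int.floordiv n 2 else PySem.Int.mod n 2)
        + sum_divs_and_rems_alt (n - 1) := by
  have fd : ∀ a : Int, PySem.Int.floordiv a 2 = a / 2 :=
    fun a => PySem.Int.floordiv_eq_ediv_of_pos (by norm_num)
  have md : ∀ a : Int, PySem.Int.mod a 2 = a % 2 :=
    fun a => PySem.Int.mod_eq_emod_of_pos (by norm_num)
  simp only [sum_divs_and_rems_alt, fd, md]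
  set m : Int := (n + 1) / 2 with hm
  rcases Int.emod_two_eq n with he | ho
  · -- n even: (n+1)/2 = n/2 = m', m unchanged, step adds n % 2 = 0
    have h1 : (n - 1 + 1) / 2 = m := by omega
    rw [h1]
    simp [he]
  · -- n odd: n = 2m - 1, previous m is m - 1, step adds n / 2 = m - 1
    have h1 : (n - 1 + 1) / 2 = m - 1 := by omega
    have h2 : n / 2 = m - 1 := by omega
    rw [h1, h2]
    have key : m * (m - 1) = (m - 1) * ((m - 1) - 1) + (m - 1) * 2 := by ring
    rw [if_pos ho, key, Int.add_mul_ediv_right _ _ (by norm_num : (2:Int) ≠ 0)]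
    ring

theorem loop_inv : ∀ (k : Nat) (n s : Int) (o : Option Int), n.toNat = k → 1 ≤ n →
    sum_divs_and_rems_loop n s o = some (s + sum_divs_and_rems_alt n) := by
  intro k
  induction k using Nat.strong_induction_on with
  | _ k ih =>
    intro n s o hk hn
    rw [sum_divs_and_rems_loop, dif_pos hn]
    by_cases h2 : 2 ≤ n
    · rw [ih (n - 1).toNat (by omega) (n - 1) _ _ rfl (by omega)]
      rw [alt_step n h2]
      congr 1
      split <;> ring
    · -- n = 1: loop body runs once, then stops
      have hn1 : n = 1 := by omega
      subst hn1
      rw [sum_divs_and_rems_loop]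
      norm_num [sum_divs_and_rems_alt, PySem.Int.mod, PySem.Int.floordiv,
        show Int.fmod 1 2 = 1 from rfl, show Int.fdiv 1 2 = 0 from rfl]

-- ===== VERDICT (by name: the statement is the Claim_ definition above) =====
theorem sum_divs_and_rems_spec : Claim_equal_sum_divs_and_rems := by
  intro n _ hpre
  unfold Spec_sum_divs_and_rems sum_divs_and_rems
  rw [loop_inv n.toNat n 0 none rfl hpre]
  simp
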